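-- pv_equiv track=rewrite | github.com/ESA-VirES/VirES-Server | vires/vires/model_eval/common.py | get_max_data_shape
-- ===== SOURCE A (Python) =====
-- def get_max_data_shape(shapes):
--     """ Get maximum of the given shapes. """
--     def _max_shape(shape1, shape2):
--         if len(shape1) > len(shape2):
--             shape1, shape2 = shape2, shape1
--         return (
--             *(max(dim1, dim2) for dim1, dim2 in zip(shape1, shape2)),
--             *shape2[len(shape1):len(shape2)],
--         )
--     max_shape = ()
--     for shape in shapes:
--         max_shape = _max_shape(max_shape, shape)
--     return max_shape
-- ===== SOURCE B (Python) =====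
-- def get_max_data_shape(shapes):
--     """ Get maximum of the given shapes. """
--     length = max((len(shape) for shape in shapes), default=0)
--     return tuple(
--         max(shape[i] for shape in shapes if len(shape) > i)
--         for i in range(length)
--     )
-- ===== Notes on version B (the rewrite author's own statement) =====
-- stated objective: alternative
-- what changed: Replaces the pairwise left-fold merge of shape tuples with a column-wise reduction: compute the maximum rank up front, then take the max over all shapes long enough at each dimension position.
import Mathlib
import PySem

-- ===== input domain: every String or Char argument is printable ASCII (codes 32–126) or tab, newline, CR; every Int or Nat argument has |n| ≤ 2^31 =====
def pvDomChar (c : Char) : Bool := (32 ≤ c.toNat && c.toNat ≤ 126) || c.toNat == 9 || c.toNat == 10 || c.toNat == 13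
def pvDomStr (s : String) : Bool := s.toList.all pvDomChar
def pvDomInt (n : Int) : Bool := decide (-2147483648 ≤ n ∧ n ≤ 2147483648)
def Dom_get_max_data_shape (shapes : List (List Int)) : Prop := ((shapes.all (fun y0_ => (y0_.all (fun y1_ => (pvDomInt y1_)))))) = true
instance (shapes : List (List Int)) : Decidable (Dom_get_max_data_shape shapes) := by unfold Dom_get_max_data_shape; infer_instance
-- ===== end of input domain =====

-- B replaces A's pairwise left-fold merge with a column-wise max over each dimension position (alternative decomposition, same cost).

-- ===== PORT A =====
-- helper `_max_shape` of A
def pvMaxShape (shape1 shape2 : List Int) : List Int :=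
  let p := if shape1.length > shape2.length then (shape2, shape1) else (shape1, shape2)
  (List.zipWith max p.1 p.2) ++
    PySem.List.slice p.2 (some (p.1.length : Int)) (some (p.2.length : Int))

def get_max_data_shape (shapes : List (List Int)) : List Int :=
  shapes.foldl (fun maxShape shape => pvMaxShape maxShape shape) []

-- ===== PORT B =====
def get_max_data_shape_alt (shapes : List (List Int)) : List Int :=
  let length := shapes.foldl (fun acc shape => max acc shape.length) 0
  (List.range length).map (fun i =>
    match PySem.List.max?
        ((shapes.filter (fun shape => decide (i < shape.length))).map
          (fun shape => shape.getD i 0)) (fun x => x) with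
    | some m => m
    | none => 0)   -- unreachable: for i < length some shape has length > i

-- ===== PRECONDITION & SPEC =====
def Spec_get_max_data_shape (shapes : List (List Int)) (out : List Int) : Prop := out = get_max_data_shape_alt shapes
instance (shapes : List (List Int)) (out : List Int) : Decidable (Spec_get_max_data_shape shapes out) := by unfold Spec_get_max_data_shape; infer_instance

-- ===== CLAIM (what is proved, stated in full; the proofs are below) =====
def Claim_equal_get_max_data_shape : Prop := ∀ (shapes : List (List Int)), Dom_get_max_data_shape shapes → Spec_get_max_data_shape shapes (get_max_data_shape shapes)

-- ===== LEMMAS AND PROOFS =====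

/-- Pointwise merge of optional entries: max where both exist, the present one otherwise. -/
def omax : Option Int → Option Int → Option Int
  | none, b => b
  | some x, none => some x
  | some x, some y => some (max x y)

theorem omax_comm (a b : Option Int) : omax a b = omax b a := by
  cases a <;> cases b <;> simp [omax, max_comm]

theorem pvMaxShape_core (s1 s2 : List Int) (h : s1.length ≤ s2.length) (n : Nat) :
    ((List.zipWith max s1 s2) ++
      PySem.List.slice s2 (some (s1.length : Int)) (some (s2.length : Int)))[n]? =
    omax s1[n]? s2[n]? := by
  rw [PySem.List.slice_natCast]
  have htake : (s2.drop s1.length).take (s2.length - s1.length) = s2.drop s1.length := by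
    apply List.take_of_length_le; simp
  rw [htake]
  by_cases hn : n < s1.length
  · rw [List.getElem?_append_left (by simpa [Nat.min_eq_left h] using hn)]
    have h2 : n < s2.length := lt_of_lt_of_le hn h
    simp [List.getElem?_zipWith, List.getElem?_eq_getElem hn, List.getElem?_eq_getElem h2, omax]
  · rw [List.getElem?_append_right (by simpa [Nat.min_eq_left h] using hn)]
    have : s1[n]? = none := List.getElem?_eq_none (by omega)
    simp [this, omax, List.getElem?_drop, Nat.min_eq_left h]
    congr 1
    omega

theorem pvMaxShape_get? (s1 s2 : List Int) (n : Nat) :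
    (pvMaxShape s1 s2)[n]? = omax s1[n]? s2[n]? := by
  unfold pvMaxShape
  by_cases h : s1.length > s2.length
  · simp only [h, if_pos]
    rw [pvMaxShape_core s2 s1 (le_of_lt h) n, omax_comm]
  · simp only [h, if_false]
    exact pvMaxShape_core s1 s2 (Nat.le_of_not_lt h) n

theorem foldl_get? (l : List (List Int)) (acc : List Int) (n : Nat) :
    (l.foldl (fun m s => pvMaxShape m s) acc)[n]? =
    l.foldl (fun o s => omax o s[n]?) acc[n]? := by
  induction l generalizing acc with
  | nil => rfl
  | cons x xs ih => simp [List.foldl_cons, ih, pvMaxShape_get?]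

theorem foldl_omax_filter (l : List (List Int)) (n : Nat) (o : Option Int) :
    l.foldl (fun o s => omax o s[n]?) o =
    ((l.filter (fun s => decide (n < s.length))).map (fun s => s.getD n 0)).foldl
      (fun o x => omax o (some x)) o := by
  induction l generalizing o with
  | nil => rfl
  | cons x xs ih =>
    by_cases h : n < x.length
    · simp [h, ih, List.getD]
    · have : x[n]? = none := List.getElem?_eq_none (by omega)
      have ho : omax o none = o := by cases o <;> rfl
      simp [h, ho, ih]

theorem foldl_omax_some (t : List Int) (c : Int) :
    t.foldl (fun o x => omax o (some x)) (some c) = some (t.foldl max c) := by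
  induction t generalizing c with
  | nil => rfl
  | cons y ys ih =>
    rw [List.foldl_cons, List.foldl_cons]
    exact ih (max c y)

theorem foldl_omax_eq_max? (cands : List Int) :
    cands.foldl (fun o x => omax o (some x)) none =
    PySem.List.max? cands (fun x => x) := by
  cases cands with
  | nil => rfl
  | cons c t =>
    rw [PySem.List.max?_id_cons, List.foldl_cons]
    exact foldl_omax_some t c

theorem lt_foldl_max_len (l : List (List Int)) (n init : Nat) :
    n < l.foldl (fun acc s => max acc s.length) init ↔
      n < init ∨ ∃ s ∈ l, n < s.length := by
  induction l generalizing init with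
  | nil => simp
  | cons x xs ih =>
    simp [List.foldl_cons, ih]
    tauto

theorem filter_nil_iff (l : List (List Int)) (n : Nat) :
    l.filter (fun s => decide (n < s.length)) = [] ↔ ¬ ∃ s ∈ l, n < s.length := by
  simp [List.filter_eq_nil_iff]

-- ===== VERDICT (by name: the statement is the Claim_ definition above) =====
theorem get_max_data_shape_spec : Claim_equal_get_max_data_shape := by
  intro shapes _
  unfold Spec_get_max_data_shape get_max_data_shape get_max_data_shape_alt
  apply List.ext_getElem?
  intro n
  rw [foldl_get?, show (([] : List Int))[n]? = none from rfl, foldl_omax_filter,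
    foldl_omax_eq_max?]
  by_cases h : n < shapes.foldl (fun acc s => max acc s.length) 0
  · have hex : ∃ s ∈ shapes, n < s.length := by
      rcases (lt_foldl_max_len shapes n 0).mp h with h0 | h1
      · omega
      · exact h1
    have hcne :
        (shapes.filter (fun s => decide (n < s.length))).map (fun s => s.getD n 0) ≠ [] := by
      simp only [ne_eq, List.map_eq_nil_iff, filter_nil_iff]
      simpa using hex
    rcases hm : PySem.List.max?
        ((shapes.filter (fun s => decide (n < s.length))).map (fun s => s.getD n 0))
        (fun x => x) with _ | m
    · exact absurd ((PySem.List.max?_eq_none_iff _ _).mp hm) hcne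
    · rw [List.getElem?_map, List.getElem?_range h, Option.map_some, hm]
  · have hnone : ∀ s ∈ shapes, ¬ n < s.length := by
      intro s hs hlt
      exact h ((lt_foldl_max_len shapes n 0).mpr (Or.inr ⟨s, hs, hlt⟩))
    have hc :
        (shapes.filter (fun s => decide (n < s.length))).map (fun s => s.getD n 0) = [] := by
      simp only [List.map_eq_nil_iff, filter_nil_iff]
      simpa using hnone
    rw [hc]
    exact (List.getElem?_eq_none (by simpa using h)).symm
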